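-- pv_equiv track=rewrite | github.com/saumya-kumar/schrodinger-scraper | 🔎_systematic_path_exploration_Phase_7.py | _generate_structure_variations
-- ===== SOURCE A (Python) =====
-- from typing import Set, List, Dict, Any, Optional
--
-- def _generate_structure_variations(structure: str, segments: Dict[str, int]) -> List[str]:
--     """Generate variations based on common path structures"""
--     variations = []
--
--     # Count placeholders in structure
--     placeholder_count = structure.count('{}')
--
--     if placeholder_count == 0:
--         return [structure]
--
--     # Get most common segments for filling placeholders
--     common_segments = list(segments.keys())[:20]  # Top 20 most common
--
--     # Generate combinations (limited to prevent explosion)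
--     if placeholder_count == 1:
--         for segment in common_segments[:50]:
--             variations.append(structure.format(segment))
--
--     elif placeholder_count == 2:
--         for seg1 in common_segments[:10]:
--             for seg2 in common_segments[:5]:
--                 variations.append(structure.format(seg1, seg2))
--
--     elif placeholder_count == 3:
--         for seg1 in common_segments[:5]:
--             for seg2 in common_segments[:3]:
--                 for seg3 in common_segments[:3]:
--                     variations.append(structure.format(seg1, seg2, seg3))
--
--     return variations
-- ===== SOURCE B (Python) =====
-- _LIMITS = {1: (50,), 2: (10, 5), 3: (5, 3, 3)}
--
-- def _generate_structure_variations(structure: str, segments) -> list: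
--     """Mixed-radix variant: compute each output by index arithmetic instead of nested loops."""
--     placeholder_count = structure.count('{}')
--     if placeholder_count == 0:
--         return [structure]
--     limits = _LIMITS.get(placeholder_count)
--     if limits is None:
--         return []
--     common = list(segments.keys())[:20]
--     dims = [min(n, len(common)) for n in limits]
--     total = 1
--     for d in dims:
--         total *= d
--     out = []
--     for i in range(total):
--         idxs = []
--         r = i
--         for d in reversed(dims):
--             r, q = divmod(r, d)
--             idxs.append(q)
--         out.append(structure.format(*(common[j] for j in reversed(idxs))))
--     return out
-- ===== Notes on version B (the rewrite author's own statement) =====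
-- stated objective: alternative
-- what changed: Replaces the three hardcoded nested-loop branches by a single flat loop over range(total) that decodes each index into a mixed-radix digit tuple with divmod and formats the segments it selects, the per-position radices coming from a limits table.
-- outside the precondition, e.g. on _generate_structure_variations('{{}}{!s}', {'x': 1}): A returns ['{}x'], B returns ['{}x']
import Mathlib
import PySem

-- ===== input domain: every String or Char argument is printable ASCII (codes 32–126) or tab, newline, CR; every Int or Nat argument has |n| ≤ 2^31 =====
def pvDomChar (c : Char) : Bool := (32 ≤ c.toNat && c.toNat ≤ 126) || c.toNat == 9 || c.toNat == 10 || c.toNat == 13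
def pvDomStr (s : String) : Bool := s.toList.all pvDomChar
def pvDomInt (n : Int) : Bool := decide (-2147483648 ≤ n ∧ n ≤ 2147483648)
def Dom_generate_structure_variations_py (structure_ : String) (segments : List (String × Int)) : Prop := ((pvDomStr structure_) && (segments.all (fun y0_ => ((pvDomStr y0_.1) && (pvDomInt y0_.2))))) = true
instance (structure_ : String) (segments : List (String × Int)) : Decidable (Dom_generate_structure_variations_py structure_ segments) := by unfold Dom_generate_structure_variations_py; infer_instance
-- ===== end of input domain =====

-- B replaces A's three hardcoded nested-loop branches by a single flat loop that decodes each
-- output index into a mixed-radix digit tuple (objective: alternative); return values only.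

-- ===== PORT A =====
-- Shared port of str.format for format strings built of '{{', '}}' and '{}' only (exact there;
-- extra args are ignored, as in Python). Pre_ restricts format calls to exactly this language.
def pyFormatAux : List Char → List String → List Char
  | [], _ => []
  | [c], _ => [c]
  | c1 :: c2 :: r, args =>
    if c1 == '{' then
      if c2 == '{' then '{' :: pyFormatAux r args
      else if c2 == '}' then
        match args with
        | a :: rest => a.toList ++ pyFormatAux r rest
        | [] => pyFormatAux r []
      else c1 :: pyFormatAux (c2 :: r) args
    else if c1 == '}' && c2 == '}' then '}' :: pyFormatAux r args
    else c1 :: pyFormatAux (c2 :: r) args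

def pyFormat (s : String) (args : List String) : String := String.ofList (pyFormatAux s.toList args)

def generate_structure_variations_py (structure_ : String) (segments : List (String × Int)) : List String :=
  let placeholder_count := PySem.Str.count structure_ "{}"
  if placeholder_count = 0 then [structure_]
  else
    let common_segments := ((PySem.Dict.ofList segments).keys).take 20
    if placeholder_count = 1 then
      (common_segments.take 50).foldl (fun acc seg => acc ++ [pyFormat structure_ [seg]]) []
    else if placeholder_count = 2 then
      (common_segments.take 10).foldl (fun acc s1 =>
        (common_segments.take 5).foldl (fun acc2 s2 =>
          acc2 ++ [pyFormat structure_ [s1, s2]]) acc) []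
    else if placeholder_count = 3 then
      (common_segments.take 5).foldl (fun acc s1 =>
        (common_segments.take 3).foldl (fun acc2 s2 =>
          (common_segments.take 3).foldl (fun acc3 s3 =>
            acc3 ++ [pyFormat structure_ [s1, s2, s3]]) acc2) acc) []
    else []

-- ===== PORT B =====
def pvLimits : PySem.Dict Nat (List Nat) :=
  PySem.Dict.ofList [(1, [50]), (2, [10, 5]), (3, [5, 3, 3])]

-- the inner 'for d in reversed(dims): r, q = divmod(r, d); idxs.append(q)' loop, then
-- 'reversed(idxs)' as in Source B; r, q are nonnegative so Nat '/', '%' are exact for divmod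
def pvDecode (dims : List Nat) (i : Nat) : List Nat :=
  ((dims.reverse.foldl (fun (p : Nat × List Nat) d => (p.1 / d, p.2 ++ [p.1 % d])) (i, [])).2).reverse

def generate_structure_variations_py_alt (structure_ : String) (segments : List (String × Int)) : List String :=
  let placeholder_count := PySem.Str.count structure_ "{}"
  if placeholder_count = 0 then [structure_]
  else
    match PySem.Dict.get? pvLimits placeholder_count with
    | none => []
    | some limits =>
      let common := ((PySem.Dict.ofList segments).keys).take 20
      let dims := limits.map (fun n => min n common.length)
      let total := dims.foldl (· * ·) 1
      (List.range total).map (fun i =>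
        pyFormat structure_ ((pvDecode dims i).map (fun j => common.getD j "")))

-- ===== PRECONDITION & SPEC =====
-- True iff the string is a sequence of '{{', '}}', '{}' tokens and brace-free characters
def pvBraceTok : List Char → Bool
  | [] => true
  | [c] => !(c == '{' || c == '}')
  | c1 :: c2 :: r =>
    if c1 == '{' then (c2 == '{' || c2 == '}') && pvBraceTok r
    else if c1 == '}' then (c2 == '}') && pvBraceTok r
    else pvBraceTok (c2 :: r)

-- Pre_ excludes structures with 1–3 occurrences of '{}' whose braces are not built purely of
-- '{{', '}}' and '{}': Python's str.format raises on nearly all of those (single braces, or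
-- named/indexed fields mixed with auto '{}'), except contrived cases like '{{}}{!s}' where
-- escape pairs inflate the '{}' count to feed a spec'd auto field; A and B (both call
-- str.format) agree there, but the ported str.format is exact only on the token language.
def Pre_generate_structure_variations_py (structure_ : String) (segments : List (String × Int)) : Prop :=
  (1 ≤ PySem.Str.count structure_ "{}" ∧ PySem.Str.count structure_ "{}" ≤ 3) →
    pvBraceTok structure_.toList = true
instance (structure_ : String) (segments : List (String × Int)) : Decidable (Pre_generate_structure_variations_py structure_ segments) := by unfold Pre_generate_structure_variations_py; infer_instance

def pvWitness_generate_structure_variations_py : String × (List (String × Int)) :=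
  ("/api/{}/docs", [("users", 7), ("items", 3)])

def Spec_generate_structure_variations_py (structure_ : String) (segments : List (String × Int)) (out : List String) : Prop := out = generate_structure_variations_py_alt structure_ segments
instance (structure_ : String) (segments : List (String × Int)) (out : List String) : Decidable (Spec_generate_structure_variations_py structure_ segments out) := by unfold Spec_generate_structure_variations_py; infer_instance

-- ===== CLAIM (what is proved, stated in full; the proofs are below) =====
def Claim_equal_generate_structure_variations_py : Prop := ∀ (structure_ : String) (segments : List (String × Int)), Dom_generate_structure_variations_py structure_ segments → Pre_generate_structure_variations_py structure_ segments → Spec_generate_structure_variations_py structure_ segments (generate_structure_variations_py structure_ segments)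

-- ===== LEMMAS AND PROOFS =====

-- A's nested appending loops as flatMap/map
theorem nested2 (l1 l2 : List String) (f : String → String → String) (a : List String) :
    l1.foldl (fun acc s1 => l2.foldl (fun acc2 s2 => acc2 ++ [f s1 s2]) acc) a
      = a ++ l1.flatMap (fun s1 => l2.map (f s1)) := by
  induction l1 generalizing a with
  | nil => simp
  | cons x t ih =>
      simp only [List.foldl_cons, List.flatMap_cons,
        PySem.List.foldl_append_singleton_eq_map]
      simp [List.flatMap]

theorem nested3 (l1 l2 l3 : List String) (f : String → String → String → String) (a : List String) :
    l1.foldl (fun acc s1 =>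
      l2.foldl (fun acc2 s2 =>
        l3.foldl (fun acc3 s3 => acc3 ++ [f s1 s2 s3]) acc2) acc) a
      = a ++ l1.flatMap (fun s1 => l2.flatMap (fun s2 => l3.map (f s1 s2))) := by
  induction l1 generalizing a with
  | nil => simp
  | cons x t ih =>
      simp only [List.foldl_cons, List.flatMap_cons, nested2]
      simp [List.flatMap]

-- range over a product splits as a flatMap of mixed-radix blocks
theorem rangeMul (a b : Nat) :
    List.range (a * b) = (List.range a).flatMap (fun q => (List.range b).map (fun r => q * b + r)) := by
  induction a with
  | zero => simp
  | succ a ih =>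
      rw [Nat.succ_mul, List.range_add, ih, List.range_succ, List.flatMap_append]
      simp

-- taking the first n elements is mapping getD over range (min n len)
theorem rangeTake (l : List String) (n : Nat) :
    (List.range (min n l.length)).map (fun i => l.getD i "") = l.take n := by
  apply List.ext_getElem
  · simp
  · intro i h1 h2
    have hi : i < l.length := by simp at h1; omega
    simp only [List.getElem_map, List.getElem_range, List.getElem_take,
      List.getD_eq_getElem l "" hi]

theorem decode1 (d i : Nat) (hi : i < d) : pvDecode [d] i = [i] := by
  simp [pvDecode, Nat.mod_eq_of_lt hi]

theorem divAux (d q r : Nat) (hr : r < d) : (q * d + r) / d = q := by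
  have h : 0 < d := lt_of_le_of_lt (Nat.zero_le r) hr
  rw [Nat.add_comm, Nat.add_mul_div_right r q h, Nat.div_eq_of_lt hr, Nat.zero_add]

theorem decode2 (d1 d2 q r : Nat) (hq : q < d1) (hr : r < d2) :
    pvDecode [d1, d2] (q * d2 + r) = [q, r] := by
  simp [pvDecode, Nat.mod_eq_of_lt hr, divAux d2 q r hr, Nat.mod_eq_of_lt hq]

theorem decode3 (d1 d2 d3 q1 q2 r : Nat) (h1 : q1 < d1) (h2 : q2 < d2) (hr : r < d3) :
    pvDecode [d1, d2, d3] ((q1 * d2 + q2) * d3 + r) = [q1, q2, r] := by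
  simp [pvDecode, Nat.mod_eq_of_lt hr, divAux d3 (q1 * d2 + q2) r hr,
    divAux d2 q1 q2 h2, Nat.mod_eq_of_lt h1, Nat.mod_eq_of_lt h2]

-- helper abbreviation for the proof (common segments list)
def pvCommon (segments : List (String × Int)) : List String :=
  ((PySem.Dict.ofList segments).keys).take 20

-- ===== VERDICT (by name: the statement is the Claim_ definition above) =====
theorem generate_structure_variations_py_spec : Claim_equal_generate_structure_variations_py := by
  intro structure_ segments _ _
  unfold Spec_generate_structure_variations_py
  unfold generate_structure_variations_py generate_structure_variations_py_alt
  generalize PySem.Str.count structure_ "{}" = n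
  rcases n with _ | _ | _ | _ | k
  · rfl
  · -- one placeholder
    set L := pvCommon segments with hL
    set d := min 50 L.length with hd
    show (L.take 50).foldl (fun acc seg => acc ++ [pyFormat structure_ [seg]]) []
      = (List.range ([d].foldl (· * ·) 1)).map (fun i =>
          pyFormat structure_ ((pvDecode [d] i).map (fun j => L.getD j "")))
    rw [PySem.List.foldl_append_singleton_eq_map, List.nil_append]
    have : [d].foldl (· * ·) 1 = d := by simp
    rw [this, ← rangeTake L 50, ← hd, List.map_map]
    apply List.map_congr_left
    intro i hi
    rw [List.mem_range] at hi
    simp [decode1 d i hi]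
  · -- two placeholders
    set L := pvCommon segments with hL
    set d1 := min 10 L.length with hd1
    set d2 := min 5 L.length with hd2
    show (L.take 10).foldl (fun acc s1 => (L.take 5).foldl
        (fun acc2 s2 => acc2 ++ [pyFormat structure_ [s1, s2]]) acc) []
      = (List.range ([d1, d2].foldl (· * ·) 1)).map (fun i =>
          pyFormat structure_ ((pvDecode [d1, d2] i).map (fun j => L.getD j "")))
    rw [nested2, List.nil_append]
    have : [d1, d2].foldl (· * ·) 1 = d1 * d2 := by simp
    rw [this, rangeMul, List.map_flatMap]
    rw [← rangeTake L 10, ← rangeTake L 5, ← hd1, ← hd2, List.flatMap_map]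
    apply List.flatMap_congr
    intro q hq
    rw [List.mem_range] at hq
    rw [List.map_map, List.map_map]
    apply List.map_congr_left
    intro r hr
    rw [List.mem_range] at hr
    simp [decode2 d1 d2 q r hq hr]
  · -- three placeholders
    set L := pvCommon segments with hL
    set d1 := min 5 L.length with hd1
    set d2 := min 3 L.length with hd2
    show (L.take 5).foldl (fun acc s1 => (L.take 3).foldl
        (fun acc2 s2 => (L.take 3).foldl
          (fun acc3 s3 => acc3 ++ [pyFormat structure_ [s1, s2, s3]]) acc2) acc) []
      = (List.range ([d1, d2, d2].foldl (· * ·) 1)).map (fun i =>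
          pyFormat structure_ ((pvDecode [d1, d2, d2] i).map (fun j => L.getD j "")))
    rw [nested3, List.nil_append]
    have : [d1, d2, d2].foldl (· * ·) 1 = (d1 * d2) * d2 := by simp [Nat.mul_assoc]
    rw [this, rangeMul, List.map_flatMap, rangeMul]
    rw [List.flatMap_assoc]
    rw [← rangeTake L 5, ← rangeTake L 3, ← hd1, ← hd2, List.flatMap_map]
    apply List.flatMap_congr
    intro q1 hq1
    rw [List.mem_range] at hq1
    simp only [List.flatMap_map, List.map_map, Function.comp_def]
    apply List.flatMap_congr
    intro q2 hq2
    rw [List.mem_range] at hq2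
    apply List.map_congr_left
    intro r hr
    rw [List.mem_range] at hr
    simp [decode3 d1 d2 d2 q1 q2 r hq1 hq2 hr]
  · rfl
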